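-- pv_equiv track=rewrite | github.com/NinjaCompacto/Exercicios-de-Algoritmo-e-Estrutura-de-Dados-2 | Fila de Prioridades/Aumentar chave/aumentar_chave.py | aumentar_chave
-- ===== SOURCE A (Python) =====
-- def acha_pai (pos):
--     pai = (pos-1)//2
--
--     if pai < 0:
--         return
--     else:
--         return pai
--
-- def aumentar_chave (heap,pos,novo):
--
--     if pos >= len(heap):
--         heap.append(novo)
--     else:
--         heap[pos] = novo
--
--     while pos > 0 and heap[acha_pai(pos)] > novo:
--         heap[acha_pai(pos)], heap[pos] = heap[pos], heap[acha_pai(pos)]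
--         pos = acha_pai(pos)
--
--     return heap
-- ===== SOURCE B (Python) =====
-- # B: staged sift-up — materialises the ancestor chain, takes the prefix of ancestors
-- # larger than novo, then does one bulk shift along that path and a single placement of novo.
-- def aumentar_chave(heap, pos, novo):
--     if pos >= len(heap):
--         heap.append(novo)
--     else:
--         heap[pos] = novo
--     # ancestors of pos, nearest first
--     cadeia = []
--     p = pos
--     while p > 0:
--         p = (p - 1) // 2
--         cadeia.append(p)
--     # longest prefix of ancestors whose value exceeds novo
--     deslocados = []
--     for q in cadeia:
--         if heap[q] > novo:
--             deslocados.append(q)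
--         else:
--             break
--     # shift each such ancestor down to its child on the path, then drop novo in
--     for dst, src in zip([pos] + deslocados, deslocados):
--         heap[dst] = heap[src]
--     heap[deslocados[-1] if deslocados else pos] = novo
--     return heap
-- ===== Notes on version B (the rewrite author's own statement) =====
-- stated objective: alternative
-- what changed: A's single destructive swap loop is replaced by staged passes: materialise the ancestor chain of pos as a list, take the prefix of ancestors whose value exceeds novo, bulk-shift those values one step down the path, and place novo once at the last shifted slot.
-- outside the precondition, e.g. on aumentar_chave([5], 3, 0): A returns [5, 0], B raises IndexError; on aumentar_chave([5, 6], -3, 0): A raises IndexError, B raises IndexError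
import Mathlib
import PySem

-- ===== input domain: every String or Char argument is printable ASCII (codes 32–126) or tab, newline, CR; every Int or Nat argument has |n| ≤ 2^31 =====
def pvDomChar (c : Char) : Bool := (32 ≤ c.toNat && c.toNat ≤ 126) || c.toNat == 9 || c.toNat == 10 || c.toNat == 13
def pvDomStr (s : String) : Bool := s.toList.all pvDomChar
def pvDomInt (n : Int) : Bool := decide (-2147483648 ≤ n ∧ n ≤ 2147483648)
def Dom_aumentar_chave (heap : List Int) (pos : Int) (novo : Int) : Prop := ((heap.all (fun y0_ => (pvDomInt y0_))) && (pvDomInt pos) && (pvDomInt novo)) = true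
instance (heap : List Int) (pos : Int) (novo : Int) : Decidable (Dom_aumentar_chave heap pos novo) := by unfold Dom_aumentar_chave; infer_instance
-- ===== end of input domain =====

-- B replaces A's destructive swap loop by staged passes (ancestor chain, matching prefix,
-- one bulk shift, one placement); equivalence is about the RETURN value
-- (both Python functions also mutate `heap` in place, identically on Pre_).

-- ===== PORT A =====
def acha_pai (pos : Int) : Option Int :=
  let pai := PySem.Int.floordiv (pos - 1) 2
  if pai < 0 then none else some pai

lemma achaPai_getD_lt (pos : Int) (h : 0 < pos) : ((acha_pai pos).getD 0).toNat < pos.toNat := by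
  unfold acha_pai
  rw [PySem.Int.floordiv_eq_ediv_of_pos (by omega : (0:Int) < 2)]
  rw [if_neg (by omega)]
  simp only [Option.getD_some]
  omega

def aumentar_chave_loop (heap : List Int) (pos : Int) (novo : Int) : List Int :=
  if h : 0 < pos ∧ novo < PySem.List.pyGetD heap ((acha_pai pos).getD 0) 0 then
    let pai := (acha_pai pos).getD 0
    let heap' := PySem.List.pySetD (PySem.List.pySetD heap pai (PySem.List.pyGetD heap pos 0))
                   pos (PySem.List.pyGetD heap pai 0)
    aumentar_chave_loop heap' pai novo
  else heap
termination_by pos.toNat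
decreasing_by exact achaPai_getD_lt pos h.1

def aumentar_chave (heap : List Int) (pos : Int) (novo : Int) : List Int :=
  let heap0 := if pos ≥ (heap.length : Int) then heap ++ [novo] else PySem.List.pySetD heap pos novo
  aumentar_chave_loop heap0 pos novo

-- ===== PORT B =====
lemma pai_toNat_lt (pos : Int) (h : 0 < pos) : (PySem.Int.floordiv (pos - 1) 2).toNat < pos.toNat := by
  rw [PySem.Int.floordiv_eq_ediv_of_pos (by omega : (0:Int) < 2)]
  omega

-- the `while p > 0: p = (p-1)//2; cadeia.append(p)` pass
def cadeia_de (pos : Int) : List Int :=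
  if h : 0 < pos then
    let p := PySem.Int.floordiv (pos - 1) 2
    p :: cadeia_de p
  else []
termination_by pos.toNat
decreasing_by exact pai_toNat_lt pos h

-- the `for q in cadeia: if heap[q] > novo: append else break` pass
def deslocados_de (heap : List Int) (cadeia : List Int) (novo : Int) : List Int :=
  match cadeia with
  | [] => []
  | q :: rest =>
      if novo < PySem.List.pyGetD heap q 0 then q :: deslocados_de heap rest novo else []

-- the `for dst, src in zip(...): heap[dst] = heap[src]` pass
def aplica_shift (heap : List Int) (pares : List (Int × Int)) : List Int :=
  pares.foldl (fun h ds => PySem.List.pySetD h ds.1 (PySem.List.pyGetD h ds.2 0)) heap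

def aumentar_chave_alt (heap : List Int) (pos : Int) (novo : Int) : List Int :=
  let heap0 := if pos ≥ (heap.length : Int) then heap ++ [novo] else PySem.List.pySetD heap pos novo
  let cadeia := cadeia_de pos
  let deslocados := deslocados_de heap0 cadeia novo
  let heap1 := aplica_shift heap0 ((pos :: deslocados).zip deslocados)
  PySem.List.pySetD heap1 (deslocados.getLast?.getD pos) novo

-- ===== PRECONDITION & SPEC =====
-- Pre_ excludes pos < -len(heap) (A's initial write raises IndexError) and pos > len(heap),
-- where A appends novo at index len — unrelated to pos — and then either raises IndexError in
-- the loop or returns with the element at an index different from the requested one; B raises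
-- IndexError on all of those inputs, so they lie outside the claim.
def Pre_aumentar_chave (heap : List Int) (pos : Int) (novo : Int) : Prop :=
  -(heap.length : Int) ≤ pos ∧ pos ≤ (heap.length : Int)
instance (heap : List Int) (pos : Int) (novo : Int) : Decidable (Pre_aumentar_chave heap pos novo) := by
  unfold Pre_aumentar_chave; infer_instance

def pvWitness_aumentar_chave : List Int × Int × Int := ([3, 5, 7], 2, 1)

def Spec_aumentar_chave (heap : List Int) (pos : Int) (novo : Int) (out : List Int) : Prop := out = aumentar_chave_alt heap pos novo
instance (heap : List Int) (pos : Int) (novo : Int) (out : List Int) : Decidable (Spec_aumentar_chave heap pos novo out) := by unfold Spec_aumentar_chave; infer_instance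

-- ===== CLAIM (what is proved, stated in full; the proofs are below) =====
def Claim_equal_aumentar_chave : Prop := ∀ (heap : List Int) (pos : Int) (novo : Int), Dom_aumentar_chave heap pos novo → Pre_aumentar_chave heap pos novo → Spec_aumentar_chave heap pos novo (aumentar_chave heap pos novo)

-- ===== LEMMAS AND PROOFS =====

lemma achaPai_getD (pos : Int) (h : 0 < pos) :
    (acha_pai pos).getD 0 = PySem.Int.floordiv (pos - 1) 2 := by
  unfold acha_pai
  rw [if_neg (by rw [PySem.Int.floordiv_eq_ediv_of_pos (by omega : (0:Int) < 2)]; omega)]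
  rfl

lemma pySetD_pySetD {α : Type} (xs : List α) (i : Int) (v : α) :
    PySem.List.pySetD (PySem.List.pySetD xs i v) i v = PySem.List.pySetD xs i v := by
  unfold PySem.List.pySetD PySem.List.pySet?
  cases h : PySem.List.pyIdx? xs.length i with
  | none => simp [h]
  | some k => simp [h, List.length_set, List.set_set]

lemma cadeia_pos (pos : Int) (h : 0 < pos) :
    cadeia_de pos = PySem.Int.floordiv (pos - 1) 2 :: cadeia_de (PySem.Int.floordiv (pos - 1) 2) := by
  rw [cadeia_de, dif_pos h]

lemma cadeia_nonpos (pos : Int) (h : ¬ 0 < pos) : cadeia_de pos = [] := by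
  rw [cadeia_de, dif_neg h]

-- every element of the chain of pos is ≥ 0 and < pos
lemma cadeia_mem (n : Nat) : ∀ (pos : Int), pos.toNat ≤ n →
    ∀ q ∈ cadeia_de pos, 0 ≤ q ∧ q < pos := by
  induction n with
  | zero =>
    intro pos hn q hq
    rw [cadeia_nonpos pos (by omega)] at hq
    simp at hq
  | succ n ih =>
    intro pos hn q hq
    by_cases h : 0 < pos
    · rw [cadeia_pos pos h] at hq
      have hpe : PySem.Int.floordiv (pos - 1) 2 = (pos - 1) / 2 :=
        PySem.Int.floordiv_eq_ediv_of_pos (by omega : (0:Int) < 2)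
      rcases List.mem_cons.mp hq with rfl | hq'
      · constructor <;> omega
      · have := ih (PySem.Int.floordiv (pos - 1) 2) (by omega) q hq'
        constructor <;> omega
    · rw [cadeia_nonpos pos h] at hq; simp at hq

-- deslocados only reads heap at chain positions
lemma deslocados_congr (h1 h2 : List Int) (cadeia : List Int) (novo : Int)
    (hr : ∀ q ∈ cadeia, PySem.List.pyGetD h1 q 0 = PySem.List.pyGetD h2 q 0) :
    deslocados_de h1 cadeia novo = deslocados_de h2 cadeia novo := by
  induction cadeia with
  | nil => rfl
  | cons q rest ih =>
    unfold deslocados_de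
    rw [hr q (List.mem_cons_self ..)]
    by_cases hg : novo < PySem.List.pyGetD h2 q 0
    · rw [if_pos hg, if_pos hg, ih (fun q hq => hr q (List.mem_cons_of_mem _ hq))]
    · rw [if_neg hg, if_neg hg]

lemma getLast?_getD_cons {α : Type} (a : α) (l : List α) (d : α) :
    (a :: l).getLast?.getD d = l.getLast?.getD a := by
  cases l with
  | nil => rfl
  | cons b l' => rw [List.getLast?_cons_cons]; cases h : (b :: l').getLast? with
    | none => simp at h
    | some x => rfl

lemma pyGetD_set_ne (h : List Int) (i : Nat) (x : Int) (q : Int)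
    (hq0 : 0 ≤ q) (hqlt : q.toNat < h.length) (hne : q.toNat ≠ i) :
    PySem.List.pyGetD (h.set i x) q 0 = PySem.List.pyGetD h q 0 := by
  rw [PySem.List.pyGetD_eq_getElem _ _ hq0 (by rw [List.length_set]; omega),
      PySem.List.pyGetD_eq_getElem _ _ hq0 (by omega)]
  exact List.getElem_set_ne (by omega) _

lemma set_self_of_getElem (h : List Int) (i : Nat) (hi : i < h.length) :
    h.set i h[i] = h := List.set_getElem_self ..

-- the main invariant: A's swap loop computes B's staged result,
-- provided heap already carries novo at a valid position pos
lemma loop_eq (n : Nat) : ∀ (pos : Int) (heap : List Int) (novo : Int),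
    pos.toNat ≤ n → 0 ≤ pos → pos < (heap.length : Int) →
    heap[pos.toNat]? = some novo →
    aumentar_chave_loop heap pos novo
      = (let S := deslocados_de heap (cadeia_de pos) novo
         PySem.List.pySetD (aplica_shift heap ((pos :: S).zip S)) (S.getLast?.getD pos) novo) := by
  induction n with
  | zero =>
    intro pos heap novo hn h0 hlt hval
    have hpos0 : pos = 0 := by omega
    subst hpos0
    rw [aumentar_chave_loop, dif_neg (by omega)]
    simp only [cadeia_nonpos 0 (by omega), deslocados_de, List.zip_nil_right, aplica_shift,
      List.foldl_nil, List.getLast?_nil, Option.getD_none]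
    rw [PySem.List.pySetD_of_nonneg _ _ (le_refl 0)]
    have : heap[(0:Int).toNat] = novo := by
      have := hval; rw [List.getElem?_eq_getElem (by omega)] at this
      exact Option.some.inj this
    rw [← this]
    exact (set_self_of_getElem heap _ (by omega)).symm
  | succ n ih =>
    intro pos heap novo hn h0 hlt hval
    have hvl : pos.toNat < heap.length := by omega
    have hvE : heap[pos.toNat] = novo := by
      have := hval; rw [List.getElem?_eq_getElem hvl] at this; exact Option.some.inj this
    by_cases hpos : 0 < pos
    · have hpar : (acha_pai pos).getD 0 = PySem.Int.floordiv (pos - 1) 2 := achaPai_getD pos hpos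
      set p : Int := PySem.Int.floordiv (pos - 1) 2 with hpdef
      have hpe : p = (pos - 1) / 2 := by
        rw [hpdef, PySem.Int.floordiv_eq_ediv_of_pos (by omega : (0:Int) < 2)]
      have hp0 : 0 ≤ p := by omega
      have hplt : p < pos := by omega
      have hpl : p.toNat < heap.length := by omega
      have hne : p.toNat ≠ pos.toNat := by omega
      have hgP : PySem.List.pyGetD heap p 0 = heap[p.toNat] :=
        PySem.List.pyGetD_eq_getElem _ _ hp0 (by omega)
      have hgPos : PySem.List.pyGetD heap pos 0 = novo := by
        rw [PySem.List.pyGetD_eq_getElem _ _ h0 (by omega), hvE]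
      set v : Int := heap[p.toNat] with hvdef
      rw [cadeia_pos pos hpos, ← hpdef]
      simp only [deslocados_de]
      rw [aumentar_chave_loop]
      by_cases hg : novo < PySem.List.pyGetD heap p 0
      · rw [dif_pos ⟨hpos, by rw [hpar]; exact hg⟩, if_pos hg]
        simp only [hpar]
        -- A's swapped heap
        have hswap :
            PySem.List.pySetD (PySem.List.pySetD heap p (PySem.List.pyGetD heap pos 0)) pos
              (PySem.List.pyGetD heap p 0)
            = (heap.set pos.toNat v).set p.toNat novo := by
          rw [hgPos, hgP,
              PySem.List.pySetD_of_nonneg _ _ hp0, PySem.List.pySetD_of_nonneg _ _ h0]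
          exact List.set_comm _ _ (by omega)
        rw [hswap]
        set h1 : List Int := heap.set pos.toNat v with h1def
        set heap' : List Int := h1.set p.toNat novo with h'def
        have hlen1 : h1.length = heap.length := List.length_set ..
        have hlen' : heap'.length = heap.length := by
          rw [h'def, List.length_set, hlen1]
        -- IH applies at p on heap'
        have hval' : heap'[p.toNat]? = some novo := by
          rw [h'def, List.getElem?_eq_getElem (by simp only [List.length_set, hlen1]; omega),
              List.getElem_set_self (by simp only [List.length_set, hlen1]; omega)]
        have ihp := ih p heap' novo (by omega) hp0 (by omega) hval'
        rw [ihp]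
        -- the chain of p reads the same values in heap' and heap
        have hreads : ∀ q ∈ cadeia_de p, PySem.List.pyGetD heap' q 0 = PySem.List.pyGetD heap q 0 := by
          intro q hq
          obtain ⟨hq0, hqp⟩ := cadeia_mem p.toNat p (le_refl _) q hq
          have hql : q.toNat < heap.length := by omega
          rw [h'def, pyGetD_set_ne _ _ _ _ hq0 (by rw [hlen1]; omega) (by omega),
              h1def, pyGetD_set_ne _ _ _ _ hq0 hql (by omega)]
        have hS : deslocados_de heap' (cadeia_de p) novo = deslocados_de heap (cadeia_de p) novo :=
          deslocados_congr _ _ _ _ hreads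
        rw [hS]
        set S' : List Int := deslocados_de heap (cadeia_de p) novo with hS'def
        -- getLast? bookkeeping
        rw [getLast?_getD_cons p S' pos]
        -- compare the two aplica_shift runs
        simp only [List.zip_cons_cons, aplica_shift, List.foldl_cons]
        rw [hgP, PySem.List.pySetD_of_nonneg _ _ h0, ← h1def]
        -- remains: first steps agree; heap' = h1.set p novo, overwritten before read
        cases hSc : S' with
        | nil =>
          simp only [List.zip_nil_right, List.foldl_nil, List.getLast?_nil, Option.getD_none]
          rw [PySem.List.pySetD_of_nonneg _ _ hp0, PySem.List.pySetD_of_nonneg _ _ hp0,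
              h'def, List.set_set]
        | cons s0 rest =>
          -- elements of S' lie in the chain of p, hence < p
          have hs0 : 0 ≤ s0 ∧ s0 < p := by
            have hmem : s0 ∈ cadeia_de p := by
              have : S' ≠ [] → S'.head? = some s0 := by rw [hSc]; intro _; rfl
              -- s0 is the head of deslocados, which is the head of cadeia_de p
              cases hc : cadeia_de p with
              | nil => rw [hS'def, hc] at hSc; simp [deslocados_de] at hSc
              | cons c cr =>
                rw [hS'def, hc] at hSc
                unfold deslocados_de at hSc
                by_cases hgc : novo < PySem.List.pyGetD heap c 0
                · rw [if_pos hgc] at hSc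
                  have : c = s0 := (List.cons.injEq ..).mp hSc |>.1
                  rw [this]; exact List.mem_cons_self ..
                · rw [if_neg hgc] at hSc; simp at hSc
            exact cadeia_mem p.toNat p (le_refl _) s0 hmem
          simp only [List.zip_cons_cons, List.foldl_cons]
          -- first write of each run lands on index p; reads at s0 ≠ p agree
          have hrd : PySem.List.pyGetD heap' s0 0 = PySem.List.pyGetD h1 s0 0 := by
            rw [h'def]
            exact pyGetD_set_ne _ _ _ _ hs0.1 (by rw [hlen1]; omega) (by omega)
          rw [hrd, h'def, PySem.List.pySetD_of_nonneg _ _ hp0,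
              PySem.List.pySetD_of_nonneg _ _ hp0, List.set_set]
      · rw [dif_neg (by rw [hpar]; tauto), if_neg hg]
        simp only [List.zip_nil_right, aplica_shift, List.foldl_nil, List.getLast?_nil,
          Option.getD_none]
        rw [PySem.List.pySetD_of_nonneg _ _ h0, ← hvE]
        exact (set_self_of_getElem heap _ hvl).symm
    · rw [aumentar_chave_loop, dif_neg (by tauto), cadeia_nonpos pos hpos]
      simp only [deslocados_de, List.zip_nil_right, aplica_shift, List.foldl_nil,
        List.getLast?_nil, Option.getD_none]
      rw [PySem.List.pySetD_of_nonneg _ _ h0, ← hvE]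
      exact (set_self_of_getElem heap _ hvl).symm

-- ===== VERDICT (by name: the statement is the Claim_ definition above) =====
theorem aumentar_chave_spec : Claim_equal_aumentar_chave := by
  intro heap pos novo _ hpre
  obtain ⟨hlo, hhi⟩ := hpre
  unfold Spec_aumentar_chave aumentar_chave aumentar_chave_alt
  set heap0 := if pos ≥ (heap.length : Int) then heap ++ [novo] else PySem.List.pySetD heap pos novo with h0def
  by_cases hneg : pos < 0
  · rw [aumentar_chave_loop, dif_neg (by omega), cadeia_nonpos pos (by omega)]
    simp only [deslocados_de, List.zip_nil_right, aplica_shift, List.foldl_nil,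
      List.getLast?_nil, Option.getD_none]
    have h0 : heap0 = PySem.List.pySetD heap pos novo := by
      rw [h0def, if_neg (by omega)]
    rw [h0, pySetD_pySetD]
  · have hnn : 0 ≤ pos := by omega
    have hlt : pos < (heap0.length : Int) := by
      by_cases hge : pos ≥ (heap.length : Int)
      · rw [h0def, if_pos hge]; simp; omega
      · rw [h0def, if_neg hge, PySem.List.pySetD_of_nonneg _ _ hnn, List.length_set]; omega
    have hval : heap0[pos.toNat]? = some novo := by
      by_cases hge : pos ≥ (heap.length : Int)
      · have hpl : pos = (heap.length : Int) := by omega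
        rw [h0def, if_pos hge, hpl]
        simp
      · rw [h0def, if_neg hge, PySem.List.pySetD_of_nonneg _ _ hnn,
            List.getElem?_eq_getElem (by simp only [List.length_set]; omega),
            List.getElem_set_self (by simp only [List.length_set]; omega)]
    exact loop_eq pos.toNat pos heap0 novo (le_refl _) hnn hlt hval
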